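-- pv_equiv track=rewrite | github.com/jeongYuri/coding-test-solution | 백준/Gold/1941. 소문난 칠공주/소문난 칠공주.py | check
-- ===== SOURCE A (Python) =====
-- from collections import deque
--
-- direct = [(-1, 0), (1, 0), (0, -1), (0, 1)]
--
-- def check(combi):
--     visited = [False] * 7
--
--     q = deque()
--     q.append(combi[0])
--     visited[0] = True
--     count = 1
--
--     while q:
--         x, y = q.popleft()
--         for d in direct:
--             nx = x + d[0]
--             ny = y + d[1]
--             if (nx, ny) in combi:
--                 nextIdx = combi.index((nx, ny))
--
--                 if not visited[nextIdx]:
--                     q.append((nx, ny))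
--                     visited[nextIdx] = True
--                     count += 1
--
--     return True if count == 7 else False
-- ===== SOURCE B (Python) =====
-- def check(combi):
--     reached = {combi[0]}
--     for _ in range(len(combi) - 1):
--         reached = reached | {(x, y) for (x, y) in combi
--                              if (x - 1, y) in reached or (x + 1, y) in reached
--                              or (x, y - 1) in reached or (x, y + 1) in reached}
--     return len(reached) == 7
-- ===== Notes on version B (the rewrite author's own statement) =====
-- stated objective: alternative
-- what changed: Replaces the BFS queue + 7-slot visited array + list.index bookkeeping with round-based set saturation: a set of reached cells is repeatedly extended by every cell orthogonally adjacent to it for len(combi)-1 rounds, then its size is compared with 7.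
import Mathlib
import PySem

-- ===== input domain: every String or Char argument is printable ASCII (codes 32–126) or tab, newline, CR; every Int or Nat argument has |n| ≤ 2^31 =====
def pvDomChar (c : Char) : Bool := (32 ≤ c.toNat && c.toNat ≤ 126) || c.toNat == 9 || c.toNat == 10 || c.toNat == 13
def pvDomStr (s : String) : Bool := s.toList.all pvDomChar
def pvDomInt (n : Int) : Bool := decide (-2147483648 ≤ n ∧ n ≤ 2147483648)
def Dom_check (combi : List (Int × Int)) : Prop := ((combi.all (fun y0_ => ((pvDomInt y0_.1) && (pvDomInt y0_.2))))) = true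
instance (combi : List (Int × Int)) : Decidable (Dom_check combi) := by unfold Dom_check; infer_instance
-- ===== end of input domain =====

-- B replaces A's BFS queue/visited-array/index bookkeeping with round-based set saturation (alternative
-- structure, not faster); both raise on the empty list, so equivalence is claimed on nonempty lists of at
-- most 7 cells (see Pre_check).

-- ===== PORT A =====
def pvDirect : List (Int × Int) := [(-1, 0), (1, 0), (0, -1), (0, 1)]

-- one body of A's 'for d in direct' loop, on the state (q, visited, count)
def pvStep (combi : List (Int × Int)) (x y : Int)
    (st : List (Int × Int) × List Bool × Int) (d : Int × Int) :
    List (Int × Int) × List Bool × Int :=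
  let nx := x + d.1
  let ny := y + d.2
  if (nx, ny) ∈ combi then
    let nextIdx : Nat := (PySem.List.index? combi (nx, ny)).getD 0  -- combi.index(..): some, since the membership test just succeeded
    -- visited[nextIdx]: in range whenever the Python returns (Pre_check guarantees nextIdx < 7)
    if PySem.List.pyGetD st.2.1 (nextIdx : Int) true = false then
      (st.1 ++ [(nx, ny)], PySem.List.pySetD st.2.1 (nextIdx : Int) true, st.2.2 + 1)
    else st
  else st

-- A's 'while q' loop; the fuel only makes it total: under Pre_check at most 6 cells are ever appended,
-- so at most 7 iterations pop a cell and fuel 16 is never exhausted (proved in pvBfs_main below)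
def pvBfs (combi : List (Int × Int)) : Nat → List (Int × Int) → List Bool → Int → Int
  | 0, _, _, count => count
  | _ + 1, [], _, count => count
  | fuel + 1, (x, y) :: rest, visited, count =>
      let st := pvDirect.foldl (pvStep combi x y) (rest, visited, count)
      pvBfs combi fuel st.1 st.2.1 st.2.2

def check (combi : List (Int × Int)) : Bool :=
  match PySem.List.pyGet? combi 0 with
  | none => false  -- combi[0] raises IndexError on the empty list; excluded by Pre_check
  | some c0 =>
      let visited := PySem.List.pySetD (List.replicate 7 false) 0 true
      let count := pvBfs combi 16 [c0] visited 1
      if count == 7 then true else false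

-- ===== PORT B =====
def check_alt (combi : List (Int × Int)) : Bool :=
  match PySem.List.pyGet? combi 0 with
  | none => false  -- combi[0] raises IndexError on the empty list; excluded by Pre_check
  | some c0 =>
      let reached := (PySem.List.pyRange 0 ((combi.length : Int) - 1) 1).foldl
        (fun reached _ =>
          PySem.Set.union reached (combi.filter (fun c =>
            PySem.Set.contains reached (c.1 - 1, c.2) || PySem.Set.contains reached (c.1 + 1, c.2) ||
            PySem.Set.contains reached (c.1, c.2 - 1) || PySem.Set.contains reached (c.1, c.2 + 1))))
        (PySem.Set.ofList [c0])
      decide (PySem.Set.len reached = 7)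

-- ===== PRECONDITION & SPEC =====
-- Pre_check excludes the empty list, where A raises IndexError on combi[0] (and B raises there too), and
-- lists of more than 7 cells, on which A's fixed 7-slot visited array raises IndexError whenever the flood
-- fill reaches a cell whose first index is ≥ 7 (where A happens to return on such longer lists, B agrees).
def Pre_check (combi : List (Int × Int)) : Prop := combi ≠ [] ∧ combi.length ≤ 7
instance (combi : List (Int × Int)) : Decidable (Pre_check combi) := by unfold Pre_check; infer_instance
def pvWitness_check : (List (Int × Int)) := [(0, 0), (0, 1), (0, 2), (0, 3), (0, 4), (0, 5), (0, 6)]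

def Spec_check (combi : List (Int × Int)) (out : Bool) : Prop := out = check_alt combi
instance (combi : List (Int × Int)) (out : Bool) : Decidable (Spec_check combi out) := by unfold Spec_check; infer_instance

-- ===== CLAIM (what is proved, stated in full; the proofs are below) =====
def Claim_equal_check : Prop := ∀ (combi : List (Int × Int)), Dom_check combi → Pre_check combi → Spec_check combi (check combi)

-- ===== LEMMAS AND PROOFS =====

-- orthogonal adjacency of two cells (the relation both programs explore)
def pvAdj (a b : Int × Int) : Prop :=
  b = (a.1 - 1, a.2) ∨ b = (a.1 + 1, a.2) ∨ b = (a.1, a.2 - 1) ∨ b = (a.1, a.2 + 1)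

-- cells of combi connected to c0 through cells of combi
def pvReach (combi : List (Int × Int)) (c0 c : Int × Int) : Prop :=
  Relation.ReflTransGen (fun a b => b ∈ combi ∧ pvAdj a b) c0 c

def pvMarked (v : List Bool) (i : Nat) : Prop := v.getD i false = true

-- "i is the first-occurrence index of a reached cell" — what A's visited array records
def pvFR (combi : List (Int × Int)) (c0 : Int × Int) (i : Nat) : Prop :=
  ∃ h : i < combi.length, PySem.List.index? combi combi[i] = some i ∧ pvReach combi c0 combi[i]

-- the common characterisation both returns reduce to
def pvGood (combi : List (Int × Int)) (c0 : Int × Int) : Prop :=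
  combi.length = 7 ∧ combi.Nodup ∧ ∀ c ∈ combi, pvReach combi c0 c

lemma pvAdj_iff_direct (x y : Int) (b : Int × Int) :
    pvAdj (x, y) b ↔ ∃ d ∈ pvDirect, b = (x + d.1, y + d.2) := by
  rcases b with ⟨b1, b2⟩
  simp only [pvAdj, pvDirect, List.mem_cons, List.not_mem_nil, or_false, Prod.mk.injEq]
  constructor
  · rintro (⟨h1, h2⟩ | ⟨h1, h2⟩ | ⟨h1, h2⟩ | ⟨h1, h2⟩)
    · exact ⟨(-1, 0), by norm_num, by omega, by omega⟩
    · exact ⟨(1, 0), by norm_num, by omega, by omega⟩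
    · exact ⟨(0, -1), by norm_num, by omega, by omega⟩
    · exact ⟨(0, 1), by norm_num, by omega, by omega⟩
  · rintro ⟨d, (rfl | rfl | rfl | rfl), h1, h2⟩ <;> simp_all <;> omega

-- === A-side ===

structure pvInvA (combi : List (Int × Int)) (c0 : Int × Int)
    (q : List (Int × Int)) (v : List Bool) (cnt : Int) : Prop where
  hlen : v.length = 7
  hcnt : cnt = (v.count true : Int)
  h0 : pvMarked v 0
  hq : ∀ c ∈ q, ∃ i, PySem.List.index? combi c = some i ∧ pvMarked v i
  hm : ∀ i, pvMarked v i → pvFR combi c0 i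

def pvSix (combi : List (Int × Int)) (q : List (Int × Int)) (v : List Bool) : Prop :=
  ∀ i (h : i < combi.length), pvMarked v i → combi[i] ∉ q →
    ∀ b ∈ combi, pvAdj combi[i] b → ∃ j, PySem.List.index? combi b = some j ∧ pvMarked v j

lemma pvCount_true_add_false (v : List Bool) : v.count true + v.count false = v.length := by
  induction v with
  | nil => rfl
  | cons b t ih =>
    simp only [List.count_cons, List.length_cons]
    cases b <;> simp <;> omega

lemma pvMarked_set {v : List Bool} {i : Nat} (hi : i < v.length) (j : Nat) :
    pvMarked (v.set i true) j ↔ j = i ∨ pvMarked v j := by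
  unfold pvMarked
  by_cases hj : j = i
  · subst hj
    rw [List.getD_eq_getElem _ _ (by simpa using hi)]
    simp [List.getElem_set_self (by simpa using hi : j < (v.set j true).length)]
  · rw [List.getD_eq_getElem?_getD, List.getElem?_set_ne (fun h => hj h.symm),
      ← List.getD_eq_getElem?_getD]
    simp [hj]

lemma pvCount_true_set {v : List Bool} {i : Nat} (hi : i < v.length)
    (hf : ¬ pvMarked v i) : (v.set i true).count true = v.count true + 1 := by
  unfold pvMarked at hf
  rw [List.getD_eq_getElem _ _ hi] at hf
  induction v generalizing i with
  | nil => simp at hi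
  | cons b t ih =>
    cases i with
    | zero => simp at hf; subst hf; simp [List.count_cons_self]
    | succ n =>
      simp only [List.set_cons_succ, List.count_cons]
      rw [ih (by simpa using hi) (by simpa using hf)]
      omega

lemma pvCount_false_set {v : List Bool} {i : Nat} (hi : i < v.length)
    (hf : ¬ pvMarked v i) : (v.set i true).count false + 1 = v.count false := by
  have h1 := pvCount_true_add_false (v.set i true)
  have h2 := pvCount_true_add_false v
  have h3 := pvCount_true_set hi hf
  rw [List.length_set] at h1
  omega

-- one step of the inner loop: either a no-op (with the neighbour already handled) or append-and-mark
lemma pvStep_cases (combi : List (Int × Int)) (x y : Int)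
    (q : List (Int × Int)) (v : List Bool) (cnt : Int) (d : Int × Int)
    (hv : v.length = 7) (hlen : combi.length ≤ 7) :
    (pvStep combi x y (q, v, cnt) d = (q, v, cnt) ∧
      ((x + d.1, y + d.2) ∈ combi →
        ∃ j, PySem.List.index? combi (x + d.1, y + d.2) = some j ∧ pvMarked v j)) ∨
    (∃ i, PySem.List.index? combi (x + d.1, y + d.2) = some i ∧ i < combi.length ∧
      (x + d.1, y + d.2) ∈ combi ∧ ¬ pvMarked v i ∧
      pvStep combi x y (q, v, cnt) d = (q ++ [(x + d.1, y + d.2)], v.set i true, cnt + 1)) := by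
  by_cases hmem : (x + d.1, y + d.2) ∈ combi
  · obtain ⟨i, hi⟩ : ∃ i, PySem.List.index? combi (x + d.1, y + d.2) = some i :=
      Option.isSome_iff_exists.mp ((PySem.List.index?_isSome_iff combi _).mpr hmem)
    obtain ⟨hk, hget, -⟩ := PySem.List.getElem_of_index?_eq_some hi
    have hiv : i < v.length := by omega
    have hgd : PySem.List.pyGetD v ((i : Nat) : Int) true = v[i] := by
      rw [PySem.List.pyGetD_natCast, List.getD_eq_getElem _ _ hiv]
    by_cases hmk : pvMarked v i
    · left
      have hvi : v[i] = true := by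
        unfold pvMarked at hmk; rwa [List.getD_eq_getElem _ _ hiv] at hmk
      constructor
      · simp only [pvStep, hi, Option.getD_some]
        rw [if_pos hmem, if_neg (by rw [hgd, hvi]; simp)]
      · intro _; exact ⟨i, hi, hmk⟩
    · right
      refine ⟨i, hi, hk, hmem, hmk, ?_⟩
      have hvi : v[i] = false := by
        unfold pvMarked at hmk; rw [List.getD_eq_getElem _ _ hiv] at hmk
        simpa using hmk
      simp only [pvStep, hi, Option.getD_some]
      rw [if_pos hmem, if_pos (by rw [hgd, hvi]), PySem.List.pySetD_natCast]
  · left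
    refine ⟨?_, fun h => absurd h hmem⟩
    simp only [pvStep]
    rw [if_neg hmem]

-- the inner 'for d in dirs' fold preserves the invariant and handles every direction in dirs
lemma pvFold (combi : List (Int × Int)) (c0 : Int × Int) (x y : Int)
    (_hxy : (x, y) ∈ combi) (hreach : pvReach combi c0 (x, y)) (hlen : combi.length ≤ 7)
    (dirs : List (Int × Int)) (hdirs : ∀ d ∈ dirs, pvAdj (x, y) (x + d.1, y + d.2)) :
    ∀ (q : List (Int × Int)) (v : List Bool) (cnt : Int), pvInvA combi c0 q v cnt →
    (pvInvA combi c0 (dirs.foldl (pvStep combi x y) (q, v, cnt)).1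
        (dirs.foldl (pvStep combi x y) (q, v, cnt)).2.1
        (dirs.foldl (pvStep combi x y) (q, v, cnt)).2.2) ∧
    (∀ i, pvMarked v i → pvMarked (dirs.foldl (pvStep combi x y) (q, v, cnt)).2.1 i) ∧
    (∀ i, pvMarked (dirs.foldl (pvStep combi x y) (q, v, cnt)).2.1 i → pvMarked v i ∨
      ∃ h : i < combi.length, combi[i] ∈ (dirs.foldl (pvStep combi x y) (q, v, cnt)).1) ∧
    (∀ c ∈ q, c ∈ (dirs.foldl (pvStep combi x y) (q, v, cnt)).1) ∧
    (∀ d ∈ dirs, (x + d.1, y + d.2) ∈ combi →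
      ∃ j, PySem.List.index? combi (x + d.1, y + d.2) = some j ∧
        pvMarked (dirs.foldl (pvStep combi x y) (q, v, cnt)).2.1 j) ∧
    (2 * ((dirs.foldl (pvStep combi x y) (q, v, cnt)).2.1.count false) +
        (dirs.foldl (pvStep combi x y) (q, v, cnt)).1.length ≤ 2 * (v.count false) + q.length) := by
  revert hdirs
  induction dirs with
  | nil =>
    intro _ q v cnt inv
    exact ⟨inv, fun i h => h, fun i h => Or.inl h, fun c hc => hc, by simp, le_refl _⟩
  | cons d ds ih =>
    intro hdirs q v cnt inv
    have hd : pvAdj (x, y) (x + d.1, y + d.2) := hdirs d (by simp)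
    have hds : ∀ e ∈ ds, pvAdj (x, y) (x + e.1, y + e.2) := fun e he => hdirs e (by simp [he])
    rcases pvStep_cases combi x y q v cnt d inv.hlen hlen with
      ⟨heq, hhandled⟩ | ⟨i, hi, hilen, hmem, hmk, heq⟩
    · simp only [List.foldl_cons, heq]
      obtain ⟨I, M, N, Q, D, L⟩ := ih hds q v cnt inv
      refine ⟨I, M, N, Q, ?_, L⟩
      intro e he hememb
      rcases List.mem_cons.mp he with rfl | hhe
      · obtain ⟨j, hj, hmj⟩ := hhandled hememb
        exact ⟨j, hj, M j hmj⟩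
      · exact D e hhe hememb
    · have hiv : i < v.length := by rw [inv.hlen]; omega
      obtain ⟨hk, hbget, -⟩ := PySem.List.getElem_of_index?_eq_some hi
      have inv1 : pvInvA combi c0 (q ++ [(x + d.1, y + d.2)]) (v.set i true) (cnt + 1) := by
        refine ⟨by simp [inv.hlen], ?_, (pvMarked_set hiv 0).mpr (Or.inr inv.h0), ?_, ?_⟩
        · rw [pvCount_true_set hiv hmk, inv.hcnt]; push_cast; ring
        · intro c hc
          rcases List.mem_append.mp hc with hcq | hcb
          · obtain ⟨j, hj, hmj⟩ := inv.hq c hcq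
            exact ⟨j, hj, (pvMarked_set hiv j).mpr (Or.inr hmj)⟩
          · have : c = (x + d.1, y + d.2) := by simpa using hcb
            subst this
            exact ⟨i, hi, (pvMarked_set hiv i).mpr (Or.inl rfl)⟩
        · intro j hmj
          rcases (pvMarked_set hiv j).mp hmj with rfl | hold
          · refine ⟨hilen, ?_, ?_⟩
            · rw [hbget]; exact hi
            · rw [hbget]; exact Relation.ReflTransGen.tail hreach ⟨hmem, hd⟩
          · exact inv.hm j hold
      simp only [List.foldl_cons, heq]
      obtain ⟨I, M, N, Q, D, L⟩ := ih hds _ _ _ inv1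
      refine ⟨I, ?_, ?_, ?_, ?_, ?_⟩
      · exact fun j hmj => M j ((pvMarked_set hiv j).mpr (Or.inr hmj))
      · intro j hmj'
        rcases N j hmj' with hset | ⟨h, hin⟩
        · rcases (pvMarked_set hiv j).mp hset with rfl | hold
          · exact Or.inr ⟨hilen, by rw [hbget]; exact Q _ (by simp)⟩
          · exact Or.inl hold
        · exact Or.inr ⟨h, hin⟩
      · exact fun c hc => Q c (by simp [hc])
      · intro e he hememb
        rcases List.mem_cons.mp he with rfl | hhe
        · exact ⟨i, hi, M i ((pvMarked_set hiv i).mpr (Or.inl rfl))⟩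
        · exact D e hhe hememb
      · have hcf := pvCount_false_set hiv hmk
        simp only [List.length_append, List.length_cons, List.length_nil] at L ⊢
        omega

lemma pvBfs_main (combi : List (Int × Int)) (c0 : Int × Int)
    (hidx0 : PySem.List.index? combi c0 = some 0) (hlen : combi.length ≤ 7) :
    ∀ (fuel : Nat) (q : List (Int × Int)) (v : List Bool) (cnt : Int),
    pvInvA combi c0 q v cnt → pvSix combi q v →
    2 * v.count false + q.length < fuel →
    ∃ vf : List Bool, pvBfs combi fuel q v cnt = (vf.count true : Int) ∧ vf.length = 7 ∧
      ∀ i, pvMarked vf i ↔ pvFR combi c0 i := by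
  intro fuel
  induction fuel with
  | zero => intro q v cnt _ _ hf; omega
  | succ n ih =>
    intro q v cnt inv six hf
    match q with
    | [] =>
      refine ⟨v, inv.hcnt, inv.hlen, ?_⟩
      intro i
      constructor
      · exact inv.hm i
      · rintro ⟨hilen, hidx, hr⟩
        have P : ∀ c, pvReach combi c0 c →
            ∃ j, PySem.List.index? combi c = some j ∧ pvMarked v j := by
          intro c hc
          induction hc with
          | refl => exact ⟨0, hidx0, inv.h0⟩
          | tail hr step ih2 =>
            obtain ⟨j, hj, hmj⟩ := ih2
            obtain ⟨hjk, hjget, -⟩ := PySem.List.getElem_of_index?_eq_some hj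
            exact six j hjk hmj (by simp) _ step.1 (by rw [hjget]; exact step.2)
        obtain ⟨j, hj, hm'⟩ := P combi[i] hr
        have hji : j = i := by
          have := hj.symm.trans hidx
          exact Option.some.inj this
        subst hji
        exact hm'
    | (x, y) :: rest =>
      obtain ⟨ix, hix, hmix⟩ := inv.hq (x, y) (by simp)
      obtain ⟨hixlen, hixget, -⟩ := PySem.List.getElem_of_index?_eq_some hix
      have hxy_mem : (x, y) ∈ combi := by rw [← hixget]; exact List.getElem_mem _
      have hxy_reach : pvReach combi c0 (x, y) := by
        obtain ⟨h2, -, hr⟩ := inv.hm ix hmix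
        rwa [hixget] at hr
      have inv' : pvInvA combi c0 rest v cnt :=
        ⟨inv.hlen, inv.hcnt, inv.h0, fun c hc => inv.hq c (by simp [hc]), inv.hm⟩
      have hdirs : ∀ d ∈ pvDirect, pvAdj (x, y) (x + d.1, y + d.2) :=
        fun d hd => (pvAdj_iff_direct x y _).mpr ⟨d, hd, rfl⟩
      obtain ⟨I, M, N, Q, D, L⟩ :=
        pvFold combi c0 x y hxy_mem hxy_reach hlen pvDirect hdirs rest v cnt inv'
      have six' : pvSix combi (pvDirect.foldl (pvStep combi x y) (rest, v, cnt)).1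
          (pvDirect.foldl (pvStep combi x y) (rest, v, cnt)).2.1 := by
        intro i h hmi hnotq b hb hadj
        rcases N i hmi with hold | ⟨h2, hin⟩
        · by_cases hii : i = ix
          · subst hii
            obtain ⟨d, hd, hbd⟩ := (pvAdj_iff_direct x y b).mp (by rw [hixget] at hadj; exact hadj)
            obtain ⟨j, hj, hmj⟩ := D d hd (by rw [← hbd]; exact hb)
            exact ⟨j, by rw [hbd]; exact hj, hmj⟩
          · obtain ⟨hi2, hidxi, -⟩ := inv.hm i hold
            have hne : combi[i] ≠ (x, y) := by
              intro hcontra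
              have h3 : PySem.List.index? combi (combi[i]'h) = some ix := by
                rw [hcontra]; exact hix
              rw [hidxi] at h3
              exact hii (Option.some.inj h3)
            have hnotin : combi[i] ∉ (x, y) :: rest := by
              intro hcontra
              rcases List.mem_cons.mp hcontra with h4 | h4
              · exact hne h4
              · exact hnotq (Q _ h4)
            obtain ⟨j, hj, hmj⟩ := six i h hold hnotin b hb hadj
            exact ⟨j, hj, M j hmj⟩
        · exact absurd hin hnotq
      have hfuel' : 2 * (pvDirect.foldl (pvStep combi x y) (rest, v, cnt)).2.1.count false +
          (pvDirect.foldl (pvStep combi x y) (rest, v, cnt)).1.length < n := by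
        simp only [List.length_cons] at hf
        omega
      exact ih _ _ _ I six' hfuel'

lemma pvFR_all_iff_good (combi : List (Int × Int)) (c0 : Int × Int)
    (hlen : combi.length ≤ 7) (_hmem : c0 ∈ combi) :
    (∀ i < 7, pvFR combi c0 i) ↔ pvGood combi c0 := by
  constructor
  · intro h
    have h7 : combi.length = 7 := by
      obtain ⟨h6, -, -⟩ := h 6 (by omega)
      omega
    refine ⟨h7, ?_, ?_⟩
    · rw [List.nodup_iff_getElem?_ne_getElem?]
      intro i j hij hj
      obtain ⟨hjlen, hidxj, -⟩ := h j (by omega)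
      obtain ⟨hk1, heq1, hall⟩ := PySem.List.getElem_of_index?_eq_some hidxj
      have hne := hall i hij
      simp only [List.getElem?_eq_getElem (by omega : i < combi.length),
        List.getElem?_eq_getElem hj, ne_eq, Option.some.injEq]
      exact fun he => hne he
    · intro c hc
      obtain ⟨i, hi, rfl⟩ := List.mem_iff_getElem.mp hc
      obtain ⟨hki, hidxi, hr⟩ := h i (by omega)
      exact hr
  · rintro ⟨h7, hnd, hall⟩ i hi
    have hilen : i < combi.length := by omega
    refine ⟨hilen, ?_, hall _ (List.getElem_mem hilen)⟩
    rw [PySem.List.index?_eq_some_iff]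
    refine ⟨combi.take i, combi.drop (i + 1), ?_, ?_, ?_⟩
    · rw [List.getElem_cons_drop, List.take_append_drop]
    · simp [List.length_take, Nat.min_eq_left (le_of_lt hilen)]
    · intro hmem
      obtain ⟨k, hk, hke⟩ := List.mem_iff_getElem.mp hmem
      rw [List.getElem_take] at hke
      have hki : k < i := by simp at hk; omega
      have := (List.Nodup.getElem_inj_iff hnd).mp hke
      omega

lemma check_char (combi : List (Int × Int)) (c0 : Int × Int)
    (hc0 : PySem.List.pyGet? combi 0 = some c0) (hlen : combi.length ≤ 7) :
    (check combi = true ↔ pvGood combi c0) := by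
  match combi, hc0 with
  | (a :: t), hc0 =>
  have ha : a = c0 := Option.some.inj ((PySem.List.pyGet?_zero_cons a t).symm.trans hc0)
  subst ha
  have hv0 : PySem.List.pySetD (List.replicate 7 false) 0 true =
      true :: List.replicate 6 false := by decide
  have hidx0 : PySem.List.index? (a :: t) a = some 0 := PySem.List.index?_cons_self a t
  have hm_aux : ∀ i, pvMarked (true :: List.replicate 6 false) i → i = 0 := by
    intro i hi
    cases i with
    | zero => rfl
    | succ n =>
      exfalso
      unfold pvMarked at hi
      rw [List.getD_eq_getElem?_getD] at hi
      simp only [List.getElem?_cons_succ] at hi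
      rw [List.getElem?_replicate] at hi
      by_cases hn : n < 6 <;> simp [hn] at hi
  have inv : pvInvA (a :: t) a [a] (true :: List.replicate 6 false) 1 := by
    refine ⟨by simp, by decide, by rfl, ?_, ?_⟩
    · intro c hc
      have : c = a := by simpa using hc
      subst this
      exact ⟨0, hidx0, by rfl⟩
    · intro i hi
      have h0 := hm_aux i hi
      subst h0
      exact ⟨by simp, hidx0, Relation.ReflTransGen.refl⟩
  have six : pvSix (a :: t) [a] (true :: List.replicate 6 false) := by
    intro i h hmi hnotq b hb hadj
    have h0 := hm_aux i hmi
    subst h0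
    exact absurd (by simp) hnotq
  have hfuel : 2 * List.count false (true :: List.replicate 6 false) + [a].length < 16 := by
    simp
  obtain ⟨vf, hcount, hvlen, hiff⟩ :=
    pvBfs_main (a :: t) a hidx0 hlen 16 [a] (true :: List.replicate 6 false) 1 inv six hfuel
  have hcheck : check (a :: t) =
      (if ((pvBfs (a :: t) 16 [a] (true :: List.replicate 6 false) 1) == 7) then true
       else false) := by
    simp only [check, PySem.List.pyGet?_zero_cons, hv0]
  rw [hcheck, hcount]
  have hstep1 : (if ((vf.count true : Int) == 7) = true then true else false) = true ↔
      vf.count true = 7 := by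
    by_cases hc : (vf.count true : Int) = 7
    · simp [hc]; omega
    · simp [hc]
      intro hcc
      exact absurd (by exact_mod_cast hcc) hc
  have hstep2 : vf.count true = 7 ↔ ∀ i < 7, pvMarked vf i := by
    constructor
    · intro hcnt i hi
      have : ∀ b ∈ vf, true = b := List.count_eq_length.mp (by omega)
      have hvi : vf[i]'(by omega) = true := (this _ (List.getElem_mem (by omega))).symm
      unfold pvMarked
      rw [List.getD_eq_getElem _ _ (by omega), hvi]
    · intro hall
      have : ∀ b ∈ vf, true = b := by
        intro b hbv
        obtain ⟨i, hi, rfl⟩ := List.mem_iff_getElem.mp hbv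
        have := hall i (by omega)
        unfold pvMarked at this
        rw [List.getD_eq_getElem _ _ hi] at this
        exact this.symm
      have := List.count_eq_length.mpr this
      omega
  rw [hstep1, hstep2]
  have hstep3 : (∀ i < 7, pvMarked vf i) ↔ ∀ i < 7, pvFR (a :: t) a i := by
    constructor
    · exact fun h i hi => (hiff i).mp (h i hi)
    · exact fun h i hi => (hiff i).mpr (h i hi)
  rw [hstep3]
  exact pvFR_all_iff_good (a :: t) a hlen (by simp)

-- === B-side ===

def pvF (combi : List (Int × Int)) (s : PySem.Set (Int × Int)) : PySem.Set (Int × Int) :=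
  PySem.Set.union s (combi.filter (fun c =>
    PySem.Set.contains s (c.1 - 1, c.2) || PySem.Set.contains s (c.1 + 1, c.2) ||
    PySem.Set.contains s (c.1, c.2 - 1) || PySem.Set.contains s (c.1, c.2 + 1)))

structure pvInvB (combi : List (Int × Int)) (c0 : Int × Int) (s : List (Int × Int)) : Prop where
  nodup : s.Nodup
  sub : ∀ c ∈ s, c ∈ combi
  mem0 : c0 ∈ s
  sound : ∀ c ∈ s, pvReach combi c0 c

def pvClosed (combi : List (Int × Int)) (s : List (Int × Int)) : Prop :=
  ∀ c ∈ combi, (∃ a ∈ s, pvAdj a c) → c ∈ s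

lemma pvFoldl_const_iterate {α β : Type} (l : List β) (f : α → α) (s : α) :
    l.foldl (fun a _ => f a) s = f^[l.length] s := by
  induction l generalizing s with
  | nil => rfl
  | cons b t ih =>
    rw [List.foldl_cons, ih, List.length_cons, Function.iterate_succ_apply]

lemma pvTest_iff (s : List (Int × Int)) (c : Int × Int) :
    (PySem.Set.contains s (c.1 - 1, c.2) || PySem.Set.contains s (c.1 + 1, c.2) ||
     PySem.Set.contains s (c.1, c.2 - 1) || PySem.Set.contains s (c.1, c.2 + 1)) = true ↔
    ∃ a ∈ s, pvAdj a c := by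
  rcases c with ⟨c1, c2⟩
  simp only [Bool.or_eq_true, PySem.Set.contains_iff]
  constructor
  · rintro (((h | h) | h) | h)
    · refine ⟨_, h, ?_⟩
      have he : c1 - 1 + 1 = c1 := by omega
      unfold pvAdj; right; left; rw [he]
    · refine ⟨_, h, ?_⟩
      have he : c1 + 1 - 1 = c1 := by omega
      unfold pvAdj; left; rw [he]
    · refine ⟨_, h, ?_⟩
      have he : c2 - 1 + 1 = c2 := by omega
      unfold pvAdj; right; right; right; rw [he]
    · refine ⟨_, h, ?_⟩
      have he : c2 + 1 - 1 = c2 := by omega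
      unfold pvAdj; right; right; left; rw [he]
  · rintro ⟨⟨a1, a2⟩, ha, hadj⟩
    rcases hadj with h | h | h | h
    · refine Or.inl (Or.inl (Or.inr ?_))
      have he : ((c1 : Int), c2).1 + 1 = a1 ∧ ((c1 : Int), c2).2 = a2 := by
        simp only [Prod.mk.injEq] at h; constructor <;> omega
      rw [show ((c1 : Int) + 1, c2) = (a1, a2) by simp only [Prod.mk.injEq]; exact he]
      exact ha
    · refine Or.inl (Or.inl (Or.inl ?_))
      have he : (c1 : Int) - 1 = a1 ∧ (c2 : Int) = a2 := by
        simp only [Prod.mk.injEq] at h; constructor <;> omega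
      rw [show ((c1 : Int) - 1, c2) = (a1, a2) by simp only [Prod.mk.injEq]; exact he]
      exact ha
    · refine Or.inr ?_
      have he : (c2 : Int) + 1 = a2 ∧ (c1 : Int) = a1 := by
        simp only [Prod.mk.injEq] at h; constructor <;> omega
      rw [show ((c1 : Int), c2 + 1) = (a1, a2) by simp only [Prod.mk.injEq]; exact ⟨he.2, he.1⟩]
      exact ha
    · refine Or.inl (Or.inr ?_)
      have he : (c2 : Int) - 1 = a2 ∧ (c1 : Int) = a1 := by
        simp only [Prod.mk.injEq] at h; constructor <;> omega
      rw [show ((c1 : Int), c2 - 1) = (a1, a2) by simp only [Prod.mk.injEq]; exact ⟨he.2, he.1⟩]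
      exact ha

lemma pvMem_F (combi : List (Int × Int)) (s : PySem.Set (Int × Int)) (c : Int × Int) :
    c ∈ pvF combi s ↔ c ∈ s ∨ (c ∈ combi ∧ ∃ a ∈ s, pvAdj a c) := by
  unfold pvF
  rw [PySem.Set.mem_union, List.mem_filter]
  rw [pvTest_iff s c]

lemma pvF_append (combi : List (Int × Int)) (s : PySem.Set (Int × Int)) :
    ∃ e, pvF combi s = s ++ e := by
  exact ⟨_, PySem.Set.update_eq_append_filter s _⟩

lemma pvF_fixed_of_length (combi : List (Int × Int)) (s : PySem.Set (Int × Int))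
    (h : (pvF combi s).length = s.length) : pvF combi s = s := by
  obtain ⟨e, he⟩ := pvF_append combi s
  rw [he] at h ⊢
  have : e = [] := by
    rw [List.length_append] at h
    exact List.eq_nil_of_length_eq_zero (by omega)
  simp [this]

lemma pvInvB_F (combi : List (Int × Int)) (c0 : Int × Int) (s : PySem.Set (Int × Int))
    (inv : pvInvB combi c0 s) : pvInvB combi c0 (pvF combi s) := by
  refine ⟨PySem.Set.nodup_union s _ inv.nodup, ?_, ?_, ?_⟩
  · intro c hc
    rcases (pvMem_F combi s c).mp hc with h | ⟨h, -⟩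
    · exact inv.sub c h
    · exact h
  · exact (pvMem_F combi s c0).mpr (Or.inl inv.mem0)
  · intro c hc
    rcases (pvMem_F combi s c).mp hc with h | ⟨hc2, a, ha, hadj⟩
    · exact inv.sound c h
    · exact Relation.ReflTransGen.tail (inv.sound a ha) ⟨hc2, hadj⟩

lemma pvSat (combi : List (Int × Int)) (c0 : Int × Int) :
    ∀ (m : Nat) (s : PySem.Set (Int × Int)), pvInvB combi c0 s →
    combi.length ≤ s.length + m →
    pvClosed combi ((pvF combi)^[m] s) ∧ pvInvB combi c0 ((pvF combi)^[m] s) := by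
  intro m
  induction m with
  | zero =>
    intro s inv hle
    simp only [Function.iterate_zero, id_eq]
    have hsp : List.Subperm s combi := List.subperm_of_subset inv.nodup inv.sub
    have hperm : s.Perm combi := List.Subperm.perm_of_length_le hsp (by omega)
    refine ⟨?_, inv⟩
    intro c hc _
    exact hperm.mem_iff.mpr hc
  | succ m ih =>
    intro s inv hle
    rw [Function.iterate_succ_apply]
    by_cases hfix : (pvF combi s).length = s.length
    · have hfx : pvF combi s = s := pvF_fixed_of_length combi s hfix
      have hit : (pvF combi)^[m] (pvF combi s) = s := by
        rw [hfx]; exact Function.iterate_fixed hfx m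
      rw [hit]
      refine ⟨?_, inv⟩
      intro c hc ha
      have : c ∈ pvF combi s := (pvMem_F combi s c).mpr (Or.inr ⟨hc, ha⟩)
      rwa [hfx] at this
    · have hlenF : s.length ≤ (pvF combi s).length := by
        obtain ⟨e, he⟩ := pvF_append combi s
        rw [he, List.length_append]
        omega
      have hgrow : s.length < (pvF combi s).length :=
        lt_of_le_of_ne hlenF (fun h => hfix h.symm)
      exact ih (pvF combi s) (pvInvB_F combi c0 s inv) (by omega)

lemma check_alt_char (combi : List (Int × Int)) (c0 : Int × Int)
    (hc0 : PySem.List.pyGet? combi 0 = some c0) (hlen : combi.length ≤ 7) :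
    (check_alt combi = true ↔ pvGood combi c0) := by
  have hne : combi ≠ [] := by
    intro h; subst h; simp [PySem.List.pyGet?] at hc0
  have hmem : c0 ∈ combi := PySem.List.mem_of_pyGet?_eq_some combi hc0
  have hlen1 : 0 < combi.length := List.length_pos_of_ne_nil hne
  have hof : PySem.Set.ofList [c0] = [c0] := rfl
  have hfold : check_alt combi =
      decide ((PySem.Set.len ((pvF combi)^[combi.length - 1] [c0])) = 7) := by
    simp only [check_alt, hc0]
    rw [show (fun (reached : PySem.Set (Int × Int)) (_ : Int) =>
          PySem.Set.union reached (combi.filter (fun c =>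
            PySem.Set.contains reached (c.1 - 1, c.2) ||
            PySem.Set.contains reached (c.1 + 1, c.2) ||
            PySem.Set.contains reached (c.1, c.2 - 1) ||
            PySem.Set.contains reached (c.1, c.2 + 1)))) =
        (fun (s : PySem.Set (Int × Int)) (_ : Int) => pvF combi s) from rfl]
    rw [pvFoldl_const_iterate, PySem.List.length_pyRange_one, hof]
    rw [show ((combi.length : Int) - 1 - 0).toNat = combi.length - 1 by omega]
  have inv0 : pvInvB combi c0 [c0] := by
    refine ⟨by simp, ?_, by simp, ?_⟩
    · intro c hc
      have : c = c0 := by simpa using hc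
      subst this; exact hmem
    · intro c hc
      have : c = c0 := by simpa using hc
      subst this; exact Relation.ReflTransGen.refl
  obtain ⟨hclosed, invR⟩ := pvSat combi c0 (combi.length - 1) [c0] inv0 (by simp; omega)
  have hmemR : ∀ c, c ∈ (pvF combi)^[combi.length - 1] [c0] ↔ pvReach combi c0 c := by
    intro c
    constructor
    · exact invR.sound c
    · intro hr
      induction hr with
      | refl => exact invR.mem0
      | tail h step ih2 => exact hclosed _ step.1 ⟨_, ih2, step.2⟩
  rw [hfold]
  rw [show (PySem.Set.len ((pvF combi)^[combi.length - 1] [c0])) =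
      (((pvF combi)^[combi.length - 1] [c0]).length : Int) from rfl]
  rw [decide_eq_true_iff]
  constructor
  · intro h7i
    have h7 : ((pvF combi)^[combi.length - 1] [c0]).length = 7 := by exact_mod_cast h7i
    have hsp : List.Subperm ((pvF combi)^[combi.length - 1] [c0]) combi :=
      List.subperm_of_subset invR.nodup invR.sub
    have hlc : combi.length = 7 := by
      have := hsp.length_le
      omega
    have hperm : ((pvF combi)^[combi.length - 1] [c0]).Perm combi :=
      hsp.perm_of_length_le (by omega)
    refine ⟨hlc, hperm.nodup_iff.mp invR.nodup, ?_⟩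
    intro c hc
    exact (hmemR c).mp (hperm.mem_iff.mpr hc)
  · rintro ⟨h7, hnd, hall⟩
    have hsub2 : combi ⊆ (pvF combi)^[combi.length - 1] [c0] :=
      fun c hc => (hmemR c).mpr (hall c hc)
    have hsp1 : List.Subperm ((pvF combi)^[combi.length - 1] [c0]) combi :=
      List.subperm_of_subset invR.nodup invR.sub
    have hsp2 : List.Subperm combi ((pvF combi)^[combi.length - 1] [c0]) :=
      List.subperm_of_subset hnd hsub2
    have hperm := hsp1.antisymm hsp2
    have := hperm.length_eq
    omega

-- ===== VERDICT (by name: the statement is the Claim_ definition above) =====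
theorem check_spec : Claim_equal_check := by
  intro combi hdom hpre
  unfold Spec_check
  obtain ⟨hne, hlen⟩ := hpre
  match combi, hne with
  | (a :: t), _ =>
    have hc0 : PySem.List.pyGet? (a :: t) 0 = some a := PySem.List.pyGet?_zero_cons a t
    have hA := check_char (a :: t) a hc0 hlen
    have hB := check_alt_char (a :: t) a hc0 hlen
    have : check (a :: t) = true ↔ check_alt (a :: t) = true := hA.trans hB.symm
    cases h1 : check (a :: t) <;> cases h2 : check_alt (a :: t) <;> simp_all
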